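-- pv_equiv track=rewrite | github.com/AK090703/grow-a-garden-stock-bot | discord_bot.py | _build_text_lines
-- ===== SOURCE A (Python) =====
-- from typing import Dict, Tuple, Optional, List, Any
--
-- def _build_text_lines(category: str, items: List[dict], title_hint: Optional[str] = None) -> str:
--     title = f"{category.capitalize()} stock"
--     if title_hint:
--         title += f" — {title_hint}"
--     header = f"**{title} ({len(items)} item{'s' if len(items)!=1 else ''})**"
--     lines = [header]
--     remaining_chars = 2000 - len(header) - 1
--     shown = 0
--     for it in items:
--         name = str(it.get("name", "(unknown)"))
--         qty  = it.get("qty")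
--         line = f"• {name} — **{qty}**"
--         if len(line) + 1 <= remaining_chars:
--             lines.append(line)
--             remaining_chars -= (len(line) + 1)
--             shown += 1
--         else:
--             break
--     if shown < len(items):
--         lines.append(f"… +{len(items)-shown} more")
--     return "\n".join(lines)
-- ===== SOURCE B (Python) =====
-- from itertools import accumulate
-- from typing import Optional, List
--
--
-- def _build_text_lines(category: str, items: List[dict], title_hint: Optional[str] = None) -> str:
--     title = f"{category.capitalize()} stock"
--     if title_hint:
--         title += f" — {title_hint}"
--     header = f"**{title} ({len(items)} item{'s' if len(items)!=1 else ''})**"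
--     body = [f"• {it.get('name', '(unknown)')} — **{it.get('qty')}**" for it in items]
--     budget = 2000 - len(header) - 1
--     running = list(accumulate(len(line) + 1 for line in body))
--     cut = next((i for i, total in enumerate(running) if total > budget), len(body))
--     out = [header] + body[:cut]
--     if cut < len(items):
--         out.append(f"… +{len(items) - cut} more")
--     return "\n".join(out)
-- ===== Notes on version B (the rewrite author's own statement) =====
-- stated objective: alternative
-- what changed: Replaces A's stateful loop (running remaining-chars budget, break on first overflow) by a declarative pipeline: format all lines, prefix-sum their costs with itertools.accumulate, cut at the first running total exceeding the budget, slice and join.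
import Mathlib
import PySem

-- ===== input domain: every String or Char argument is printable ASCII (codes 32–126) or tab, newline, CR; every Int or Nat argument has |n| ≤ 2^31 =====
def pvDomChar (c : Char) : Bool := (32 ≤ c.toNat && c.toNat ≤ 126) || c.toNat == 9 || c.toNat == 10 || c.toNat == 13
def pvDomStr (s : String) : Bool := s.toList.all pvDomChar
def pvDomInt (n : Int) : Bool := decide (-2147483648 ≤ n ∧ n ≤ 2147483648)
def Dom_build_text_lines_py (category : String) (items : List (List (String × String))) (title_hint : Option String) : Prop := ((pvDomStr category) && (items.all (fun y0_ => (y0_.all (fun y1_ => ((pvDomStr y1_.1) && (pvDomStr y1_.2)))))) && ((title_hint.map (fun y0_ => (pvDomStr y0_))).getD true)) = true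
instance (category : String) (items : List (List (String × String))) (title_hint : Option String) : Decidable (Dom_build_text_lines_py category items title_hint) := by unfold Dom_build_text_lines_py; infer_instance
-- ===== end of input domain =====

-- B rebuilds the same text by a different decomposition (format every line, prefix-sum the
-- costs, cut at the first overflow) instead of A's stateful budget loop; objective: alternative.

-- shared formatting helpers: both Pythons build title/header/lines with identical f-strings
-- dict.get on the association list (first match; generated dicts have unique keys)
def pvDictGet (d : List (String × String)) (k : String) : Option String :=
  (d.find? (fun p => p.1 == k)).map (·.2)

-- str.capitalize, exact on ASCII: first char uppercased, rest lowercased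
def pvCapitalize (cs : List Char) : List Char :=
  match cs with
  | [] => []
  | c :: rest => PySem.Chars.upperChar c :: PySem.Chars.lower rest

-- f"• {name} — **{qty}**" with name = it.get('name','(unknown)'), qty = it.get('qty') (None prints "None")
def pvLine (it : List (String × String)) : List Char :=
  "• ".toList ++ ((pvDictGet it "name").getD "(unknown)").toList
    ++ " — **".toList ++ ((pvDictGet it "qty").getD "None").toList ++ "**".toList

-- title = f"{category.capitalize()} stock" [+ f" — {title_hint}" if title_hint is truthy]
def pvTitle (category : String) (title_hint : Option String) : List Char :=
  let t := pvCapitalize category.toList ++ " stock".toList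
  match title_hint with
  | some h => if h.toList = [] then t else t ++ " — ".toList ++ h.toList
  | none => t

-- header = f"**{title} ({len(items)} item{'s' if len(items)!=1 else ''})**"
def pvHeader (category : String) (items : List (List (String × String))) (title_hint : Option String) : List Char :=
  "**".toList ++ pvTitle category title_hint ++ " (".toList ++ PySem.Int.toChars (items.length : Int)
    ++ " item".toList ++ (if items.length ≠ 1 then "s".toList else []) ++ ")**".toList

-- ===== PORT A =====
-- A's for-loop with break: lines/remaining_chars/shown carried through, stop on first overflow
def buildALoop (its : List (List (String × String))) (lines : List (List Char))
    (remaining : Int) (shown : Nat) : List (List Char) × Nat :=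
  match its with
  | [] => (lines, shown)
  | it :: rest =>
    let line := pvLine it
    if (line.length : Int) + 1 ≤ remaining then
      buildALoop rest (lines ++ [line]) (remaining - ((line.length : Int) + 1)) (shown + 1)
    else (lines, shown)

def build_text_lines_py (category : String) (items : List (List (String × String))) (title_hint : Option String) : String :=
  let header := pvHeader category items title_hint
  let p := buildALoop items [header] (2000 - (header.length : Int) - 1) 0
  let lines := if p.2 < items.length
    then p.1 ++ ["… +".toList ++ PySem.Int.toChars ((items.length : Int) - (p.2 : Int)) ++ " more".toList]
    else p.1
  String.ofList (PySem.Chars.join "\n".toList lines)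

-- ===== PORT B =====
-- itertools.accumulate of the per-line costs
def pvAccum (xs : List Int) (acc : Int) : List Int :=
  match xs with
  | [] => []
  | x :: rest => (acc + x) :: pvAccum rest (acc + x)

def build_text_lines_py_alt (category : String) (items : List (List (String × String))) (title_hint : Option String) : String :=
  let header := pvHeader category items title_hint
  let body := items.map pvLine
  let budget : Int := 2000 - (header.length : Int) - 1
  let running := pvAccum (body.map (fun line => (line.length : Int) + 1)) 0
  let cut := (running.findIdx? (fun total => decide (budget < total))).getD body.length
  let out := header :: body.take cut
  let out := if cut < items.length
    then out ++ ["… +".toList ++ PySem.Int.toChars ((items.length : Int) - (cut : Int)) ++ " more".toList]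
    else out
  String.ofList (PySem.Chars.join "\n".toList out)

-- ===== PRECONDITION & SPEC =====
def Spec_build_text_lines_py (category : String) (items : List (List (String × String))) (title_hint : Option String) (out : String) : Prop := out = build_text_lines_py_alt category items title_hint
instance (category : String) (items : List (List (String × String))) (title_hint : Option String) (out : String) : Decidable (Spec_build_text_lines_py category items title_hint out) := by unfold Spec_build_text_lines_py; infer_instance

-- ===== CLAIM (what is proved, stated in full; the proofs are below) =====
def Claim_equal_build_text_lines_py : Prop := ∀ (category : String) (items : List (List (String × String))) (title_hint : Option String), Dom_build_text_lines_py category items title_hint → Spec_build_text_lines_py category items title_hint (build_text_lines_py category items title_hint)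

-- ===== LEMMAS AND PROOFS =====

-- the number of lines A's greedy loop keeps, as a function of the remaining budget
def cutG : List (List Char) → Int → Nat
  | [], _ => 0
  | l :: ls, r => if (l.length : Int) + 1 ≤ r then cutG ls (r - ((l.length : Int) + 1)) + 1 else 0

theorem buildALoop_eq (its : List (List (String × String))) :
    ∀ (lines : List (List Char)) (r : Int) (shown : Nat),
    buildALoop its lines r shown =
      (lines ++ (its.map pvLine).take (cutG (its.map pvLine) r),
       shown + cutG (its.map pvLine) r) := by
  induction its with
  | nil => intro lines r shown; simp [buildALoop, cutG]
  | cons it rest ih =>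
    intro lines r shown
    simp only [buildALoop, List.map_cons, cutG]
    split_ifs with h
    · simp only [ih, List.take_succ_cons, List.append_assoc, List.singleton_append, Prod.mk.injEq]
      exact ⟨trivial, by omega⟩
    · simp

theorem cut_eq (ls : List (List Char)) :
    ∀ (b a : Int),
    ((pvAccum (ls.map (fun line => (line.length : Int) + 1)) a).findIdx?
        (fun total => decide (b < total))).getD ls.length = cutG ls (b - a) := by
  induction ls with
  | nil => intro b a; simp [pvAccum, cutG]
  | cons l rest ih =>
    intro b a
    simp only [List.map_cons, pvAccum, List.findIdx?_cons, cutG]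
    by_cases h : b < a + ((l.length : Int) + 1)
    · have h2 : ¬ ((l.length : Int) + 1 ≤ b - a) := by omega
      simp [h, h2]
    · have h2 : ((l.length : Int) + 1 ≤ b - a) := by omega
      have := ih b (a + ((l.length : Int) + 1))
      have harg : b - (a + ((l.length : Int) + 1)) = b - a - ((l.length : Int) + 1) := by ring
      rw [harg] at this
      simp only [decide_eq_true_eq] at *
      rw [if_neg h, if_pos h2, ← this]
      cases hfi : (pvAccum (rest.map (fun line => (line.length : Int) + 1))
          (a + ((l.length : Int) + 1))).findIdx? (fun total => decide (b < total)) with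
      | none => simp
      | some k => simp

-- ===== VERDICT (by name: the statement is the Claim_ definition above) =====
theorem build_text_lines_py_spec : Claim_equal_build_text_lines_py := by
  intro category items title_hint _
  show build_text_lines_py category items title_hint = build_text_lines_py_alt category items title_hint
  unfold build_text_lines_py build_text_lines_py_alt
  have hc := cut_eq (items.map pvLine) (2000 - ((pvHeader category items title_hint).length : Int) - 1) 0
  rw [sub_zero] at hc
  simp only [buildALoop_eq, List.singleton_append, Nat.zero_add]
  rw [hc]
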